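-- pv_equiv track=rewrite | github.com/Kappatan/Training_arc | typist.py | typist
-- ===== SOURCE A (Python) =====
-- def typist(s):
--     u, l = 0, 1
--     k=0
--     for i in range(len(s)):
--         if ord(s[i])<97:
--             if u==1:
--                 k+=1
--             else:
--                 k+=2
--                 u,l=1,0
--         else:
--             if l==1:
--                 k+=1
--             else:
--                 k+=2
--                 u,l=0,1
--     return k
-- ===== SOURCE B (Python) =====
-- from itertools import groupby
--
-- def typist(s):
--     if not s:
--         return 0
--     runs = [k for k, _ in groupby(s, key=lambda c: ord(c) < 97)]
--     return len(s) + (len(runs) - 1) + (1 if runs[0] else 0)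
-- ===== Notes on version B (the rewrite author's own statement) =====
-- stated objective: simpler
-- what changed: Replaced the per-character caps-lock state machine (u/l flags updated in a 4-branch loop) by itertools.groupby run counting: answer = len(s) + (#category runs - 1) + (1 if the first run is 'upper'), with an empty-string guard.
import Mathlib
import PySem

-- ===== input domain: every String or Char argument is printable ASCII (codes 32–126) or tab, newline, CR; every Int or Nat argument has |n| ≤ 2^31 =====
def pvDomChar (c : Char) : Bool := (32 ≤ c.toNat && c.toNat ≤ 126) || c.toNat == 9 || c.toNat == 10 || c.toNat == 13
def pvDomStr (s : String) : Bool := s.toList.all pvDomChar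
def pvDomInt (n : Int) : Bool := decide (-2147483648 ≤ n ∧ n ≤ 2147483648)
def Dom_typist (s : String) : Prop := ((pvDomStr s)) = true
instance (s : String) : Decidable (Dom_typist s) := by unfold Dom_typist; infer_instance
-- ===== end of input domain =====

-- B replaces A's per-character caps-lock state machine by counting category runs (groupby)
-- and returning len(s) + (#runs - 1) + (1 if the first run is 'upper'); objective: simpler.

-- ===== PORT A =====
-- A iterates i over range(len(s)) reading s[i]; ported as a fold over the characters in order,
-- carrying the same (u, l, k) state, branches in the same order (ord(s[i]) = Char.toNat, exact on ASCII).
def typist (s : String) : Int :=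
  let r := s.toList.foldl
    (fun (st : Int × Int × Int) c =>
      let u := st.1; let l := st.2.1; let k := st.2.2
      if c.toNat < 97 then
        if u = 1 then (u, l, k + 1) else (1, 0, k + 2)
      else
        if l = 1 then (u, l, k + 1) else (0, 1, k + 2))
    (0, 1, 0)
  r.2.2

-- ===== PORT B =====
-- groupby(s, key=λ c, ord(c) < 97): keys of the maximal runs of equal key.
def runKeys : List Bool → List Bool
  | [] => []
  | [a] => [a]
  | a :: b :: t => if a = b then runKeys (b :: t) else a :: runKeys (b :: t)

def typist_alt (s : String) : Int :=
  if s.toList = [] then 0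
  else
    let runs := runKeys (s.toList.map (fun c => decide (c.toNat < 97)))
    (s.toList.length : Int) + ((runs.length : Int) - 1) +
      (if runs.headI = true then 1 else 0)

-- ===== PRECONDITION & SPEC =====
def Spec_typist (s : String) (out : Int) : Prop := out = typist_alt s
instance (s : String) (out : Int) : Decidable (Spec_typist s out) := by unfold Spec_typist; infer_instance

-- ===== CLAIM (what is proved, stated in full; the proofs are below) =====
def Claim_equal_typist : Prop := ∀ (s : String), Dom_typist s → Spec_typist s (typist s)

-- ===== LEMMAS AND PROOFS =====

-- number of caps-lock toggles when typing key sequence ks starting in mode b (true = upper)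
def toggles (b : Bool) : List Bool → Int
  | [] => 0
  | a :: t => (if a = b then 0 else 1) + toggles a t

def pvStep : (Int × Int × Int) → Char → (Int × Int × Int) :=
  fun st c =>
    let u := st.1; let l := st.2.1; let k := st.2.2
    if c.toNat < 97 then
      if u = 1 then (u, l, k + 1) else (1, 0, k + 2)
    else
      if l = 1 then (u, l, k + 1) else (0, 1, k + 2)

def pvMode (b : Bool) : Int × Int := if b then (1, 0) else (0, 1)

theorem foldl_step (cs : List Char) : ∀ (b : Bool) (k : Int),
    (cs.foldl pvStep ((pvMode b).1, (pvMode b).2, k)).2.2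
      = k + cs.length + toggles b (cs.map (fun c => decide (c.toNat < 97))) := by
  induction cs with
  | nil => intro b k; simp [toggles]
  | cons c cs ih =>
    intro b k
    cases b <;> by_cases h : c.toNat < 97 <;>
      simp only [List.foldl_cons, List.map_cons, toggles, pvStep, pvMode] <;>
      simp [h] <;>
      first
        | (rw [show ((1 : Int), (0 : Int), k + 1) = ((pvMode true).1, (pvMode true).2, k + 1) by simp [pvMode],
              ih true]; push_cast; ring)
        | (rw [show ((1 : Int), (0 : Int), k + 2) = ((pvMode true).1, (pvMode true).2, k + 2) by simp [pvMode],
              ih true]; push_cast; ring)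
        | (rw [show ((0 : Int), (1 : Int), k + 1) = ((pvMode false).1, (pvMode false).2, k + 1) by simp [pvMode],
              ih false]; push_cast; ring)
        | (rw [show ((0 : Int), (1 : Int), k + 2) = ((pvMode false).1, (pvMode false).2, k + 2) by simp [pvMode],
              ih false]; push_cast; ring)

theorem runKeys_head : ∀ (a : Bool) (t : List Bool), (runKeys (a :: t)).headI = a := by
  intro a t
  induction t generalizing a with
  | nil => simp [runKeys]
  | cons b t ih =>
    by_cases h : a = b
    · simp [runKeys, h, ih]
    · simp [runKeys, h]

theorem toggles_cons (b a : Bool) (t : List Bool) :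
    toggles b (a :: t) = (if a = b then 0 else 1) + toggles a t := rfl

theorem toggles_runKeys : ∀ (ks : List Bool) (b : Bool),
    toggles b ks = (if (runKeys ks).headI = b then 0 else 1) + ((runKeys ks).length : Int) - 1
      ∨ ks = [] := by
  intro ks
  induction ks with
  | nil => intro b; right; rfl
  | cons a t ih =>
    intro b; left
    cases t with
    | nil => simp [toggles, runKeys]
    | cons c t =>
      rcases ih a with h | h
      · by_cases hac : a = c
        · have hr : runKeys (a :: c :: t) = runKeys (c :: t) := by simp [runKeys, hac]
          rw [toggles_cons, h, hr, runKeys_head c t, hac]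
          simp only [if_pos rfl]
          by_cases hcb : c = b <;> simp [hcb] <;> ring
        · have hr : runKeys (a :: c :: t) = a :: runKeys (c :: t) := by simp [runKeys, hac]
          rw [toggles_cons, h, hr, runKeys_head c t]
          simp only [List.headI, List.length_cons]
          have hca : ¬ c = a := fun e => hac e.symm
          rw [if_neg hca]
          by_cases hab : a = b <;> simp [hab] <;> push_cast <;> ring
      · simp at h

-- ===== VERDICT (by name: the statement is the Claim_ definition above) =====
theorem typist_spec : Claim_equal_typist := by
  unfold Claim_equal_typist
  intro s _
  unfold Spec_typist typist typist_alt
  simp only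
  by_cases hnil : s.toList = []
  · simp [hnil]
  · rw [if_neg hnil]
    have hfold := foldl_step s.toList false 0
    rw [show pvMode false = ((0 : Int), (1 : Int)) from rfl] at hfold
    show (s.toList.foldl pvStep (0, 1, 0)).2.2 = _
    rw [hfold]
    set ks := s.toList.map (fun c => decide (c.toNat < 97)) with hks
    rcases toggles_runKeys ks false with h | h
    · rw [h]
      cases hh : (runKeys ks).headI <;> simp [hh] <;> ring
    · exact absurd (List.map_eq_nil_iff.mp (hks ▸ h)) hnil
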